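-- pv_equiv track=rewrite | github.com/sweettuse/pyaoc | cracking/chapter_16/p16_17.py | find_largest_sub
-- ===== SOURCE A (Python) =====
-- from itertools import accumulate, combinations
--
-- def find_largest_sub(l: list[int]) -> list[int]:
--     acc = list(accumulate(l))
--     pos_idx = [i for i, v in enumerate(l) if v > 0]
--     if not pos_idx:
--         return []
--     elif len(pos_idx) == 1:
--         return [l[pos_idx[0]]]
--
--     mx = float('-inf')
--     mx_idxs = None
--     for start, end in combinations(pos_idx, 2):
--         if (diff := acc[end] - acc[start]) > mx:
--             mx = diff
--             mx_idxs = start, end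
--
--     return l[mx_idxs[0]: mx_idxs[1] + 1]
-- ===== SOURCE B (Python) =====
-- def find_largest_sub(l: list[int]) -> list[int]:
--     # single forward pass: running prefix sum + running minimum prefix over
--     # positive indices (Kadane-style), no pair enumeration
--     run = 0
--     first_pos = None
--     npos = 0
--     min_acc = None   # smallest prefix sum at a positive index so far
--     min_i = None     # earliest index achieving it
--     best = None      # (diff, start, end), first strict maximizer
--     for i, v in enumerate(l):
--         run += v
--         if v > 0:
--             npos += 1
--             if first_pos is None:
--                 first_pos = i
--             if min_acc is not None:
--                 d = run - min_acc
--                 if best is None or d > best[0]: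
--                     best = (d, min_i, i)
--             if min_acc is None or run < min_acc:
--                 min_acc, min_i = run, i
--     if npos == 0:
--         return []
--     if npos == 1:
--         return [l[first_pos]]
--     _, s, e = best
--     return l[s:e + 1]
-- ===== Notes on version B (the rewrite author's own statement) =====
-- stated objective: faster
-- what changed: Replaced A's scan over all ordered pairs of positive indices (itertools.combinations, quadratic in their count) with one forward Kadane-style pass that maintains the running prefix sum, the minimum prefix sum at a positive index seen so far (earliest on ties) and the best (diff,start,end) triple, recovering exactly A's first strict maximizer.
import Mathlib
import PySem

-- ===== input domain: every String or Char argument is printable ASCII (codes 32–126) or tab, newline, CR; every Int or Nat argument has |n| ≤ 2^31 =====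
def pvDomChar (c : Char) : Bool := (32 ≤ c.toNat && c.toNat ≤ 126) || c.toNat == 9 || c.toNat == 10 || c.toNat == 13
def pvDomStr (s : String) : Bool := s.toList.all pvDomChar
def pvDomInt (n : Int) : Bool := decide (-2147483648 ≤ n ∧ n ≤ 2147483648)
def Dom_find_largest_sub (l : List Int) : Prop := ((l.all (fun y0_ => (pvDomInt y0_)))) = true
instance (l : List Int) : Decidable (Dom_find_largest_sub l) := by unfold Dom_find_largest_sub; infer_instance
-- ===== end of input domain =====

-- B replaces A's scan over all ordered pairs of positive indices by one forward
-- Kadane-style pass (running prefix sum + running minimum with earliest argmin).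

-- ===== PORT A =====
-- itertools.accumulate (running sums)
def pvAccAux (s : Int) : List Int → List Int
  | [] => []
  | x :: xs => (s + x) :: pvAccAux (s + x) xs

def pyAccumulate (l : List Int) : List Int := pvAccAux 0 l

-- [i for i, v in enumerate(l) if v > 0]
def posIdx (l : List Int) : List Int :=
  ((PySem.List.enumerate l 0).filter (fun p => decide (0 < p.2))).map (fun p => p.1)

-- itertools.combinations(xs, 2), in Python's order
def combos2 {α : Type} : List α → List (α × α)
  | [] => []
  | x :: xs => (xs.map (fun e => (x, e))) ++ combos2 xs

-- body of A's loop: state = (mx, mx_idxs), none = (−inf, None)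
def aStep (acc : List Int) (st : Option (Int × (Int × Int))) (p : Int × Int) :
    Option (Int × (Int × Int)) :=
  let d := PySem.List.pyGetD acc p.2 0 - PySem.List.pyGetD acc p.1 0
  match st with
  | none => some (d, p)
  | some (m, q) => if d > m then some (d, p) else some (m, q)

def find_largest_sub (l : List Int) : List Int :=
  let acc := pyAccumulate l
  match posIdx l with
  | [] => []
  | [i] => [PySem.List.pyGetD l i 0]
  | _ :: _ :: _ =>
    match (combos2 (posIdx l)).foldl (aStep acc) none with
    | some (_, q) => PySem.List.slice l (some q.1) (some (q.2 + 1))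
    | none => []   -- unreachable: combinations of ≥ 2 indices is nonempty

-- ===== PORT B =====
-- loop state: (run, first_pos, npos, (min_acc, min_i), best = (diff, start, end))
def bInit : Int × Option Int × Int × Option (Int × Int) × Option (Int × Int × Int) :=
  (0, none, 0, none, none)

def bStep (st : Int × Option Int × Int × Option (Int × Int) × Option (Int × Int × Int))
    (p : Int × Int) : Int × Option Int × Int × Option (Int × Int) × Option (Int × Int × Int) :=
  match st with
  | (run, fp, np, mp, best) =>
    let run := run + p.2
    if 0 < p.2 then
      let fp := match fp with | none => some p.1 | some j => some j
      let best := match mp with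
        | none => best
        | some (a, s) =>
          let d := run - a
          match best with
          | none => some (d, s, p.1)
          | some (b, q) => if d > b then some (d, s, p.1) else some (b, q)
      let mp := match mp with
        | none => some (run, p.1)
        | some (a, s) => if run < a then some (run, p.1) else some (a, s)
      (run, fp, np + 1, mp, best)
    else (run, fp, np, mp, best)

def find_largest_sub_alt (l : List Int) : List Int :=
  match (PySem.List.enumerate l 0).foldl bStep bInit with
  | (_, fp, np, _, best) =>
    if np = 0 then []
    else if np = 1 then
      match fp with
      | some i => [PySem.List.pyGetD l i 0]
      | none => []   -- unreachable: a positive element was seen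
    else
      match best with
      | some (_, s, e) => PySem.List.slice l (some s) (some (e + 1))
      | none => []   -- unreachable: at least two positives produce a pair

-- ===== PRECONDITION & SPEC =====
def Spec_find_largest_sub (l : List Int) (out : List Int) : Prop := out = find_largest_sub_alt l
instance (l : List Int) (out : List Int) : Decidable (Spec_find_largest_sub l out) := by unfold Spec_find_largest_sub; infer_instance

-- ===== CLAIM (what is proved, stated in full; the proofs are below) =====
def Claim_equal_find_largest_sub : Prop := ∀ (l : List Int), Dom_find_largest_sub l → Spec_find_largest_sub l (find_largest_sub l)

-- ===== LEMMAS AND PROOFS =====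

-- generic "first strict maximizer" fold: state = (key value, element)
def rstep {α : Type} (k : α → Int) (st : Option (Int × α)) (x : α) : Option (Int × α) :=
  match st with
  | none => some (k x, x)
  | some (m, q) => if k x > m then some (k x, x) else some (m, q)

def rfm {α : Type} (k : α → Int) (st : Option (Int × α)) (xs : List α) : Option (Int × α) :=
  xs.foldl (rstep k) st

-- left-biased max combine
def comb {α : Type} (a b : Option (Int × α)) : Option (Int × α) :=
  match a, b with
  | none, b => b
  | some p, none => some p
  | some (m, q), some (m', q') => if m' > m then some (m', q') else some (m, q)

theorem comb_none_right {α : Type} (a : Option (Int × α)) : comb a none = a := by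
  rcases a with _ | ⟨m, q⟩ <;> rfl

theorem rstep_eq_comb {α : Type} (k : α → Int) (st : Option (Int × α)) (x : α) :
    rstep k st x = comb st (some (k x, x)) := by
  rcases st with _ | ⟨m, q⟩ <;> rfl

theorem comb_assoc {α : Type} (a b c : Option (Int × α)) :
    comb a (comb b c) = comb (comb a b) c := by
  rcases a with _ | ⟨m, q⟩ <;> rcases b with _ | ⟨m', q'⟩ <;> rcases c with _ | ⟨m'', q''⟩ <;>
    simp only [comb] <;> split_ifs <;> simp only [comb] <;> split_ifs <;>
    first | rfl | omega

theorem comb_absorb_lt {α : Type} (m m' : Int) (q q' : α) (x : Option (Int × α))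
    (h : m < m') : comb (some (m, q)) (comb (some (m', q')) x) = comb (some (m', q')) x := by
  rcases x with _ | ⟨m'', q''⟩
  · simp only [comb]; split_ifs <;> first | rfl | omega
  · simp only [comb]; split_ifs <;> simp only [comb] <;> split_ifs <;> first | rfl | omega

theorem comb_absorb_le {α : Type} (m m' : Int) (q q' : α) (x : Option (Int × α))
    (h : m' ≤ m) : comb (some (m, q)) (comb (some (m', q')) x) = comb (some (m, q)) x := by
  rcases x with _ | ⟨m'', q''⟩
  · simp only [comb]; split_ifs <;> first | rfl | omega
  · simp only [comb]; split_ifs <;> simp only [comb] <;> split_ifs <;> first | rfl | omega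

theorem rfm_eq_comb {α : Type} (k : α → Int) (st : Option (Int × α)) (xs : List α) :
    rfm k st xs = comb st (rfm k none xs) := by
  induction xs generalizing st with
  | nil => simp [rfm, comb_none_right]
  | cons x xs ih =>
    show rfm k (rstep k st x) xs = comb st (rfm k (rstep k none x) xs)
    rw [ih, ih (rstep k none x), rstep_eq_comb, rstep_eq_comb]
    rw [show comb none (some (k x, x)) = some (k x, x) from rfl, ← comb_assoc]

theorem rfm_cons {α : Type} (k : α → Int) (x : α) (xs : List α) :
    rfm k none (x :: xs) = comb (some (k x, x)) (rfm k none xs) := by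
  show rfm k (rstep k none x) xs = _
  rw [rfm_eq_comb]; rfl

theorem rfm_append {α : Type} (k : α → Int) (xs ys : List α) :
    rfm k none (xs ++ ys) = comb (rfm k none xs) (rfm k none ys) := by
  show (xs ++ ys).foldl (rstep k) none = _
  rw [List.foldl_append]
  exact rfm_eq_comb k _ ys

theorem comb_map {α β : Type} (c : Int) (g : α → β) (a b : Option (Int × α)) :
    comb (a.map (fun p => (p.1 - c, g p.2))) (b.map (fun p => (p.1 - c, g p.2))) =
      (comb a b).map (fun p => (p.1 - c, g p.2)) := by
  rcases a with _ | ⟨m, q⟩ <;> rcases b with _ | ⟨m', q'⟩ <;> simp [comb] <;>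
    split_ifs <;> first | simp | omega

theorem rfm_map {α β : Type} (k : α → Int) (h : β → α) (xs : List β) :
    rfm k none (xs.map h) = (rfm (fun y => k (h y)) none xs).map (fun p => (p.1, h p.2)) := by
  induction xs with
  | nil => rfl
  | cons x xs ih =>
    rw [List.map_cons, rfm_cons, rfm_cons, ih]
    have := comb_map (α := β) (β := α) 0 h (some (k (h x), x)) (rfm (fun y => k (h y)) none xs)
    simp only [Int.sub_zero] at this
    rw [← this]
    rfl

theorem rfm_congr_mem {α : Type} (k k' : α → Int) (xs : List α)
    (h : ∀ a ∈ xs, k a = k' a) : rfm k none xs = rfm k' none xs := by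
  induction xs with
  | nil => rfl
  | cons x xs ih =>
    rw [rfm_cons, rfm_cons, h x List.mem_cons_self,
      ih (fun a ha => h a (List.mem_cons_of_mem x ha))]

theorem rfm_ne_none {α : Type} (k : α → Int) (x : α) (xs : List α) :
    rfm k none (x :: xs) ≠ none := by
  rw [rfm_cons]
  rcases h : rfm k none xs with _ | ⟨m, q⟩
  · simp [comb]
  · simp only [comb]
    split_ifs <;> simp

-- abstract B machine over tags α with valuation w
def mstep {α : Type} (w : α → Int) (st : Option (Int × α) × Option (Int × α × α)) (x : α) :
    Option (Int × α) × Option (Int × α × α) :=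
  let best := match st.1 with
    | none => st.2
    | some (a, s) =>
      let d := w x - a
      match st.2 with
      | none => some (d, s, x)
      | some (b, q) => if d > b then some (d, s, x) else some (b, q)
  let mp := match st.1 with
    | none => some (w x, x)
    | some (a, s) => if w x < a then some (w x, x) else some (a, s)
  (mp, best)

def mfold {α : Type} (w : α → Int) (st : Option (Int × α) × Option (Int × α × α))
    (xs : List α) : Option (Int × α) × Option (Int × α × α) :=
  xs.foldl (mstep w) st

def candf {α : Type} (w : α → Int) (mp : Option (Int × α)) (x : α) : Option (Int × α × α) :=
  match mp with
  | none => none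
  | some (a, s) => some (w x - a, s, x)

def mupd {α : Type} (w : α → Int) (mp : Option (Int × α)) (x : α) : Option (Int × α) :=
  match mp with
  | none => some (w x, x)
  | some (a, s) => if w x < a then some (w x, x) else some (a, s)

theorem mstep_eq {α : Type} (w : α → Int) (mp : Option (Int × α))
    (b : Option (Int × α × α)) (x : α) :
    mstep w (mp, b) x = (mupd w mp x, comb b (candf w mp x)) := by
  rcases mp with _ | ⟨a, s⟩ <;> rcases b with _ | ⟨bv, q⟩ <;>
    simp only [mstep, mupd, candf, comb]

theorem mfold_split {α : Type} (w : α → Int) (mp : Option (Int × α))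
    (b : Option (Int × α × α)) (xs : List α) :
    mfold w (mp, b) xs = ((mfold w (mp, none) xs).1, comb b (mfold w (mp, none) xs).2) := by
  induction xs generalizing mp b with
  | nil => simp [mfold, comb_none_right]
  | cons x xs ih =>
    show mfold w (mstep w (mp, b) x) xs =
      ((mfold w (mstep w (mp, none) x) xs).1,
        comb b (mfold w (mstep w (mp, none) x) xs).2)
    rw [mstep_eq, mstep_eq, ih (mupd w mp x) (comb b (candf w mp x)),
      ih (mupd w mp x) (comb none (candf w mp x))]
    rw [show comb none (candf w mp x) = candf w mp x by
      rcases candf w mp x with _ | p <;> rfl]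
    rw [← comb_assoc]

-- F a s0 xs: first strict maximizer of w over xs, shifted by a, tagged as pair (s0, ·)
def fmF {α : Type} (w : α → Int) (a : Int) (s0 : α) (xs : List α) : Option (Int × α × α) :=
  (rfm w none xs).map (fun p => (p.1 - a, s0, p.2))

def apKey {α : Type} (w : α → Int) (p : α × α) : Int := w p.2 - w p.1

def apRfm {α : Type} (w : α → Int) (xs : List α) : Option (Int × α × α) :=
  rfm (apKey w) none (combos2 xs)

theorem comb_shift {α : Type} (c : Int) (a b : Option (Int × α)) :
    comb (a.map (fun p => (p.1 - c, p.2))) (b.map (fun p => (p.1 - c, p.2))) =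
      (comb a b).map (fun p => (p.1 - c, p.2)) := by
  rcases a with _ | ⟨m, q⟩ <;> rcases b with _ | ⟨m', q'⟩ <;> simp [comb] <;>
    split_ifs <;> first | simp | omega

theorem rfm_shift {α : Type} (w : α → Int) (c : Int) (xs : List α) :
    rfm (fun y => w y - c) none xs = (rfm w none xs).map (fun p => (p.1 - c, p.2)) := by
  induction xs with
  | nil => rfl
  | cons x xs ih =>
    rw [rfm_cons, rfm_cons, ih, ← comb_shift]
    rfl

theorem apRfm_cons {α : Type} (w : α → Int) (x : α) (xs : List α) :
    apRfm w (x :: xs) = comb (fmF w (w x) x xs) (apRfm w xs) := by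
  unfold apRfm fmF
  rw [show combos2 (x :: xs) = (xs.map (fun e => (x, e))) ++ combos2 xs from rfl,
    rfm_append, rfm_map]
  congr 1
  rw [show (fun y => apKey w (x, y)) = (fun y => w y - w x) from rfl, rfm_shift,
    Option.map_map]
  rfl

theorem fmF_cons {α : Type} (w : α → Int) (a : Int) (s0 : α) (e : α) (xs : List α) :
    fmF w a s0 (e :: xs) = comb (some (w e - a, s0, e)) (fmF w a s0 xs) := by
  unfold fmF
  rw [rfm_cons]
  rcases r : rfm w none xs with _ | ⟨M, p⟩
  · rfl
  · simp only [comb, Option.map_some]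
    split_ifs <;> first | rfl | omega

-- key lemma: abstract B from a seeded minimum equals "all pairs from s0" ⊕ "pairs inside"
theorem mfold_key {α : Type} (w : α → Int) (a : Int) (s0 : α) (xs : List α) :
    (mfold w (some (a, s0), none) xs).2 = comb (fmF w a s0 xs) (apRfm w xs) := by
  induction xs generalizing a s0 with
  | nil => rfl
  | cons e xs ih =>
    have h1 : (mfold w (some (a, s0), none) (e :: xs)).2 =
        comb (some (w e - a, s0, e))
          ((mfold w (mupd w (some (a, s0)) e, none) xs).2) := by
      show (mfold w (mstep w (some (a, s0), none) e) xs).2 = _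
      rw [mstep_eq, mfold_split]
      rfl
    rw [h1, fmF_cons, apRfm_cons, ← comb_assoc]
    rw [show mupd w (some (a, s0)) e =
      (if w e < a then some (w e, e) else some (a, s0)) from rfl]
    split_ifs with hlt
    · rw [ih (w e) e]
      congr 1
      rcases r : rfm w none xs with _ | ⟨M, p⟩
      · simp only [fmF, r, Option.map_none]
        rfl
      · rw [show fmF w a s0 xs = some (M - a, s0, p) by simp [fmF, r],
          show fmF w (w e) e xs = some (M - w e, e, p) by simp [fmF, r]]
        exact (comb_absorb_lt (M - a) (M - w e) (s0, p) (e, p) (apRfm w xs)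
          (by omega)).symm
    · rw [ih a s0]
      congr 1
      rcases r : rfm w none xs with _ | ⟨M, p⟩
      · simp only [fmF, r, Option.map_none]
        rfl
      · rw [show fmF w a s0 xs = some (M - a, s0, p) by simp [fmF, r],
          show fmF w (w e) e xs = some (M - w e, e, p) by simp [fmF, r]]
        exact (comb_absorb_le (M - a) (M - w e) (s0, p) (e, p) (apRfm w xs)
          (by omega)).symm

theorem mfold_main {α : Type} (w : α → Int) (xs : List α) :
    (mfold w (none, none) xs).2 = apRfm w xs := by
  rcases xs with _ | ⟨x, rest⟩
  · rfl
  · show (mfold w (mstep w (none, none) x) rest).2 = _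
    rw [show mstep w (none, none) x = (some (w x, x), none) from rfl, mfold_key,
      apRfm_cons]

-- ---- concrete bridge: B's fold over enumerate l vs the abstract machine ----

-- the positive positions of l, paired with the prefix sum at them (offset c, first index k)
def pvPos : List Int → Int → Int → List (Int × Int)
  | [], _, _ => []
  | x :: xs, c, k =>
    if 0 < x then (k, c + x) :: pvPos xs (c + x) (k + 1) else pvPos xs (c + x) (k + 1)

def projM (mp : Option (Int × (Int × Int))) : Option (Int × Int) :=
  mp.map (fun p => (p.1, p.2.1))

def projB (b : Option (Int × (Int × Int) × (Int × Int))) : Option (Int × Int × Int) :=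
  b.map (fun p => (p.1, p.2.1.1, p.2.2.1))

theorem bStep_proj_pos (c fp np : _) (mp : Option (Int × (Int × Int)))
    (b : Option (Int × (Int × Int) × (Int × Int))) (i x : Int) (hx : 0 < x) :
    bStep (c, fp, np, projM mp, projB b) (i, x) =
      (c + x, (match fp with | none => some i | some j => some j), np + 1,
        projM (mstep Prod.snd (mp, b) (i, c + x)).1,
        projB (mstep Prod.snd (mp, b) (i, c + x)).2) := by
  rcases mp with _ | ⟨a, s⟩ <;> rcases b with _ | ⟨bv, q⟩ <;>
    simp only [bStep, mstep, projM, projB, Option.map_some, Option.map_none, hx, if_pos] <;>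
    split_ifs <;> rfl

theorem bStep_proj_neg (c fp np : _) (mpc : Option (Int × Int))
    (bc : Option (Int × Int × Int)) (i x : Int) (hx : ¬ 0 < x) :
    bStep (c, fp, np, mpc, bc) (i, x) = (c + x, fp, np, mpc, bc) := by
  simp [bStep, hx]

theorem bridge (l : List Int) (k c np : Int) (fp : Option Int)
    (mp : Option (Int × (Int × Int))) (b : Option (Int × (Int × Int) × (Int × Int))) :
    (PySem.List.enumerate l k).foldl bStep (c, fp, np, projM mp, projB b) =
      (c + l.sum,
       (match fp with
        | none => (pvPos l c k).head?.map Prod.fst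
        | some j => some j),
       np + ((pvPos l c k).length : Int),
       projM (mfold Prod.snd (mp, b) (pvPos l c k)).1,
       projB (mfold Prod.snd (mp, b) (pvPos l c k)).2) := by
  induction l generalizing k c np fp mp b with
  | nil => rcases fp with _ | j <;> simp [PySem.List.enumerate_nil, pvPos, mfold]
  | cons x xs ih =>
    rw [PySem.List.enumerate_cons, List.foldl_cons]
    by_cases hx : 0 < x
    · rw [bStep_proj_pos c fp np mp b k x hx]
      rcases hstep : mstep Prod.snd (mp, b) (k, c + x) with ⟨mp', b'⟩
      dsimp only
      rw [ih (k + 1) (c + x) (np + 1) _ mp' b']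
      have hpv : pvPos (x :: xs) c k = (k, c + x) :: pvPos xs (c + x) (k + 1) := by
        simp [pvPos, hx]
      have hmf : mfold Prod.snd (mp, b) (pvPos (x :: xs) c k) =
          mfold Prod.snd (mp', b') (pvPos xs (c + x) (k + 1)) := by
        rw [hpv]
        show mfold Prod.snd (mstep Prod.snd (mp, b) (k, c + x)) _ = _
        rw [hstep]
      rw [hmf, hpv]
      refine congrArg₂ _ (by simp; ring) (congrArg₂ _ ?_ (congrArg₂ _ (by simp; omega) rfl))
      rcases fp with _ | j <;> simp
    · rw [bStep_proj_neg c fp np (projM mp) (projB b) k x hx]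
      rw [ih (k + 1) (c + x) np fp mp b]
      have hpv : pvPos (x :: xs) c k = pvPos xs (c + x) (k + 1) := by
        simp [pvPos, hx]
      rw [hpv]
      refine congrArg₂ _ (by simp; ring) rfl

-- positive indices of pvPos are exactly posIdx's filtered indices
theorem pvPos_fst (l : List Int) (c k : Int) :
    (pvPos l c k).map Prod.fst =
      ((PySem.List.enumerate l k).filter (fun p => decide (0 < p.2))).map (fun p => p.1) := by
  induction l generalizing c k with
  | nil => rfl
  | cons x xs ih =>
    rw [PySem.List.enumerate_cons, List.filter_cons]
    by_cases hx : 0 < x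
    · simp only [pvPos, hx, if_pos, decide_true, List.map_cons, ih]
    · simp only [pvPos, hx, if_neg, decide_false, Bool.false_eq_true, not_false_iff, ih]

theorem pvAccAux_length (c : Int) (l : List Int) : (pvAccAux c l).length = l.length := by
  induction l generalizing c with
  | nil => rfl
  | cons x xs ih => simp [pvAccAux, ih]

-- stored prefix sums are exactly acc[i] (relative to offset c and first index k)
theorem pvPos_val (l : List Int) (c k : Int) :
    ∀ p ∈ pvPos l c k, 0 ≤ p.1 - k ∧ p.1 - k < (l.length : Int) ∧
      p.2 = PySem.List.pyGetD (pvAccAux c l) (p.1 - k) 0 := by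
  induction l generalizing c k with
  | nil => intro p hp; simp [pvPos] at hp
  | cons x xs ih =>
    intro p hp
    have hlen := pvAccAux_length (c + x) xs
    by_cases hx : 0 < x
    · rw [show pvPos (x :: xs) c k = (k, c + x) :: pvPos xs (c + x) (k + 1) by
        simp [pvPos, hx]] at hp
      rcases List.mem_cons.mp hp with h | h
      · subst h
        refine ⟨by omega, by simp, ?_⟩
        rw [show (k : Int) - k = ((0 : Nat) : Int) by omega,
          PySem.List.pyGetD_natCast]
        rfl
      · obtain ⟨h0, h1, h2⟩ := ih (c + x) (k + 1) p h
        refine ⟨by omega, by simp; omega, ?_⟩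
        rw [h2, show pvAccAux c (x :: xs) = (c + x) :: pvAccAux (c + x) xs from rfl]
        rw [PySem.List.pyGetD_eq_getElem _ 0 (by omega)
            (by simp [pvAccAux_length]; omega),
          PySem.List.pyGetD_eq_getElem _ 0 (by omega) (by simp [pvAccAux_length]; omega)]
        have hidx : (p.1 - k).toNat = (p.1 - (k + 1)).toNat + 1 := by omega
        simp [hidx]
    · rw [show pvPos (x :: xs) c k = pvPos xs (c + x) (k + 1) by simp [pvPos, hx]] at hp
      obtain ⟨h0, h1, h2⟩ := ih (c + x) (k + 1) p hp
      refine ⟨by omega, by simp; omega, ?_⟩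
      rw [h2, show pvAccAux c (x :: xs) = (c + x) :: pvAccAux (c + x) xs from rfl]
      rw [PySem.List.pyGetD_eq_getElem _ 0 (by omega)
          (by simp [pvAccAux_length]; omega),
        PySem.List.pyGetD_eq_getElem _ 0 (by omega) (by simp [pvAccAux_length]; omega)]
      have hidx : (p.1 - k).toNat = (p.1 - (k + 1)).toNat + 1 := by omega
      simp [hidx]

theorem mem_combos2 {α : Type} (xs : List α) (q : α × α) (h : q ∈ combos2 xs) :
    q.1 ∈ xs ∧ q.2 ∈ xs := by
  induction xs with
  | nil => simp [combos2] at h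
  | cons x xs ih =>
    simp only [combos2, List.mem_append, List.mem_map] at h
    rcases h with ⟨e, he, hq⟩ | h
    · subst hq
      exact ⟨List.mem_cons_self, List.mem_cons_of_mem x he⟩
    · exact ⟨List.mem_cons_of_mem x (ih h).1, List.mem_cons_of_mem x (ih h).2⟩

theorem combos2_map {α β : Type} (f : α → β) (xs : List α) :
    combos2 (xs.map f) = (combos2 xs).map (Prod.map f f) := by
  induction xs with
  | nil => rfl
  | cons x xs ih =>
    simp [combos2, ih, List.map_map]

-- A's fold is the generic first-strict-maximizer fold
theorem afold (acc : List Int) (ps : List (Int × Int)) :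
    ps.foldl (aStep acc) none =
      rfm (fun p : Int × Int =>
        PySem.List.pyGetD acc p.2 0 - PySem.List.pyGetD acc p.1 0) none ps := by
  unfold rfm
  congr 1
  funext st p
  rcases st with _ | ⟨m, q⟩ <;> rfl

-- transport of A's fold to the abstract all-pairs maximizer over pvPos
theorem a_transport (l : List Int) :
    (combos2 (posIdx l)).foldl (aStep (pyAccumulate l)) none =
      projB (apRfm Prod.snd (pvPos l 0 0)) := by
  rw [afold]
  have hpos : posIdx l = (pvPos l 0 0).map Prod.fst := by
    unfold posIdx
    rw [pvPos_fst]
  rw [hpos, combos2_map, rfm_map]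
  rw [rfm_congr_mem _ (apKey (Prod.snd : Int × Int → Int)) (combos2 (pvPos l 0 0))
    (by
      intro q hq
      obtain ⟨h1, h2⟩ := mem_combos2 _ q hq
      obtain ⟨_, _, hv1⟩ := pvPos_val l 0 0 q.1 h1
      obtain ⟨_, _, hv2⟩ := pvPos_val l 0 0 q.2 h2
      simp only [Int.sub_zero] at hv1 hv2
      show PySem.List.pyGetD (pyAccumulate l) (Prod.map Prod.fst Prod.fst q).2 0 -
          PySem.List.pyGetD (pyAccumulate l) (Prod.map Prod.fst Prod.fst q).1 0 =
          apKey Prod.snd q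
      rw [show (Prod.map Prod.fst Prod.fst q).2 = q.2.1 from rfl,
        show (Prod.map Prod.fst Prod.fst q).1 = q.1.1 from rfl,
        show pyAccumulate l = pvAccAux 0 l from rfl, ← hv1, ← hv2]
      rfl)]
  rfl

-- ===== VERDICT (by name: the statement is the Claim_ definition above) =====
theorem find_largest_sub_spec : Claim_equal_find_largest_sub := by
  intro l _
  unfold Spec_find_largest_sub find_largest_sub find_largest_sub_alt
  have hb := bridge l 0 0 0 none none none
  rw [show bInit = ((0 : Int), (none : Option Int), (0 : Int), projM none, projB none)
    from rfl, hb]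
  have hpos : posIdx l = (pvPos l 0 0).map Prod.fst := by
    unfold posIdx
    rw [pvPos_fst]
  rcases hpv : pvPos l 0 0 with _ | ⟨p, _ | ⟨q, rest⟩⟩
  · rw [hpv] at hpos
    simp only [List.map_nil] at hpos
    rw [hpos]
    norm_num
  · rw [hpv] at hpos
    simp only [List.map_cons, List.map_nil] at hpos
    rw [hpos]
    norm_num
  · rw [hpv] at hpos
    simp only [List.map_cons] at hpos
    rw [hpos]
    dsimp only
    have ht := a_transport l
    rw [hpos, hpv] at ht
    rw [ht, mfold_main]
    obtain ⟨m, st, en, hsome⟩ :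
        ∃ m st en, projB (apRfm Prod.snd (p :: q :: rest)) = some (m, st, en) := by
      rcases hr : apRfm Prod.snd (p :: q :: rest) with _ | ⟨m, s, e⟩
      · exfalso
        exact rfm_ne_none (apKey Prod.snd) (p, q)
          (rest.map (fun e => (p, e)) ++ combos2 (q :: rest)) hr
      · exact ⟨m, s.1, e.1, by simp [projB]⟩
    rw [hsome]
    rw [if_neg (show ¬ ((0 : Int) + (((p :: q :: rest).length : Nat) : Int) = 0) by
        simp only [List.length_cons]; push_cast; omega),
      if_neg (show ¬ ((0 : Int) + (((p :: q :: rest).length : Nat) : Int) = 1) by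
        simp only [List.length_cons]; push_cast; omega)]
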